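-- pv_equiv track=rewrite | github.com/vayuda/ThinkEdit | utils.py | get_think_length
-- ===== SOURCE A (Python) =====
-- def get_think_length(output_ids, think_start_id, think_end_id, max_length=8192):
--     think_starts = [i for i, token in enumerate(output_ids) if token == think_start_id]
--     think_ends = [i for i, token in enumerate(output_ids) if token == think_end_id]
--
--     if think_starts and think_ends:
--         return think_ends[0] - think_starts[0] + 1, True
--     elif think_starts and not think_ends:
--         return max_length, False
--     elif not think_starts and think_ends:
--         return think_ends[0] + 1, False
--     else:
--         return -1, False
-- ===== SOURCE B (Python) =====
-- def get_think_length(output_ids, think_start_id, think_end_id, max_length=8192):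
--     first_start = None
--     first_end = None
--     for i, token in enumerate(output_ids):
--         if first_start is None and token == think_start_id:
--             first_start = i
--         if first_end is None and token == think_end_id:
--             first_end = i
--         if first_start is not None and first_end is not None:
--             break
--     if first_start is not None and first_end is not None:
--         return first_end - first_start + 1, True
--     if first_start is not None:
--         return max_length, False
--     if first_end is not None:
--         return first_end + 1, False
--     return -1, False
-- ===== Notes on version B (the rewrite author's own statement) =====
-- stated objective: faster
-- what changed: Replaced the two full list-comprehension scans (which build complete index lists) by a single pass that tracks only the first start and first end index and exits as soon as both are found.
import Mathlib
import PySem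

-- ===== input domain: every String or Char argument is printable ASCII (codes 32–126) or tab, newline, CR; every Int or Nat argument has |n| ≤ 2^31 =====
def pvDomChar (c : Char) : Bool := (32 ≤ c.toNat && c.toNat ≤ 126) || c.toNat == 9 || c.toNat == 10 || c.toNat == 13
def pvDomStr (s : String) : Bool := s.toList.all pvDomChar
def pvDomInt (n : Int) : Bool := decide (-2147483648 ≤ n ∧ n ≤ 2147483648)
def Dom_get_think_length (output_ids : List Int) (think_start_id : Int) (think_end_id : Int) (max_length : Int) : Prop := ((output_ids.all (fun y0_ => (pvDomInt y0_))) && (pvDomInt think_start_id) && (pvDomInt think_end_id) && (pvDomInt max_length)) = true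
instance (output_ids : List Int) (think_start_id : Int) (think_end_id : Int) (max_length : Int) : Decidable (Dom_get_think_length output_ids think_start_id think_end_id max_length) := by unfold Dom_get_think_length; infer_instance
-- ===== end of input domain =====

-- B replaces A's two full list-building scans by one single pass with early exit (faster by a constant factor).


-- ===== PORT A =====
-- enumerate(output_ids) with Int indices, starting at i
def pvEnumFrom (i : Int) : List Int → List (Int × Int)
  | [] => []
  | t :: r => (i, t) :: pvEnumFrom (i + 1) r

def get_think_length (output_ids : List Int) (think_start_id : Int) (think_end_id : Int) (max_length : Int) : Int × Bool :=
  let think_starts := (pvEnumFrom 0 output_ids).filterMap (fun p => if p.2 = think_start_id then some p.1 else none)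
  let think_ends := (pvEnumFrom 0 output_ids).filterMap (fun p => if p.2 = think_end_id then some p.1 else none)
  match think_starts, think_ends with
  | s :: _, e :: _ => (e - s + 1, true)
  | _ :: _, [] => (max_length, false)
  | [], e :: _ => (e + 1, false)
  | [], [] => (-1, false)

-- ===== PORT B =====
-- the single for-loop of Source B: current index i, accumulators first_start / first_end, break when both set
def pvScan (think_start_id think_end_id : Int) : List Int → Int → Option Int → Option Int → Option Int × Option Int
  | [], _, fs, fe => (fs, fe)
  | t :: rest, i, fs, fe =>
    let fs' := if fs = none ∧ t = think_start_id then some i else fs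
    let fe' := if fe = none ∧ t = think_end_id then some i else fe
    if fs' ≠ none ∧ fe' ≠ none then (fs', fe')
    else pvScan think_start_id think_end_id rest (i + 1) fs' fe'

def get_think_length_alt (output_ids : List Int) (think_start_id : Int) (think_end_id : Int) (max_length : Int) : Int × Bool :=
  match pvScan think_start_id think_end_id output_ids 0 none none with
  | (some s, some e) => (e - s + 1, true)
  | (some _, none) => (max_length, false)
  | (none, some e) => (e + 1, false)
  | (none, none) => (-1, false)

-- ===== PRECONDITION & SPEC =====
def Spec_get_think_length (output_ids : List Int) (think_start_id : Int) (think_end_id : Int) (max_length : Int) (out : Int × Bool) : Prop := out = get_think_length_alt output_ids think_start_id think_end_id max_length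
instance (output_ids : List Int) (think_start_id : Int) (think_end_id : Int) (max_length : Int) (out : Int × Bool) : Decidable (Spec_get_think_length output_ids think_start_id think_end_id max_length out) := by unfold Spec_get_think_length; infer_instance

-- ===== CLAIM (what is proved, stated in full; the proofs are below) =====
def Claim_equal_get_think_length : Prop := ∀ (output_ids : List Int) (think_start_id : Int) (think_end_id : Int) (max_length : Int), Dom_get_think_length output_ids think_start_id think_end_id max_length → Spec_get_think_length output_ids think_start_id think_end_id max_length (get_think_length output_ids think_start_id think_end_id max_length)

-- ===== LEMMAS AND PROOFS =====

-- index of the first occurrence of v, counting from i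
def pvFirstIdx (v : Int) : List Int → Int → Option Int
  | [], _ => none
  | t :: r, i => if t = v then some i else pvFirstIdx v r (i + 1)

theorem head?_filterMap_enum (v : Int) (xs : List Int) (i : Int) :
    ((pvEnumFrom i xs).filterMap (fun p => if p.2 = v then some p.1 else none)).head? = pvFirstIdx v xs i := by
  induction xs generalizing i with
  | nil => simp [pvEnumFrom, pvFirstIdx]
  | cons t r ih =>
    by_cases h : t = v
    · simp [pvEnumFrom, pvFirstIdx, h]
    · simp [pvEnumFrom, pvFirstIdx, h, ih]

def pvOr : Option Int → Option Int → Option Int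
  | some a, _ => some a
  | none, x => x

theorem pvScan_eq (s e : Int) (xs : List Int) (i : Int) (fs fe : Option Int) :
    pvScan s e xs i fs fe = (pvOr fs (pvFirstIdx s xs i), pvOr fe (pvFirstIdx e xs i)) := by
  induction xs generalizing i fs fe with
  | nil => cases fs <;> cases fe <;> simp [pvScan, pvFirstIdx, pvOr]
  | cons t r ih =>
    simp only [pvScan, pvFirstIdx]
    cases fs <;> cases fe <;>
      by_cases hs : t = s <;> by_cases he : t = e <;>
        simp [hs, he, ih, pvOr] <;> split_ifs <;> simp_all [pvOr]

theorem get_think_length_spec : Claim_equal_get_think_length := by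
  intro output_ids think_start_id think_end_id max_length _
  unfold Spec_get_think_length get_think_length get_think_length_alt
  rw [pvScan_eq]
  simp only [pvOr]
  have h1 := head?_filterMap_enum think_start_id output_ids 0
  have h2 := head?_filterMap_enum think_end_id output_ids 0
  rcases hs : (pvEnumFrom 0 output_ids).filterMap (fun p => if p.2 = think_start_id then some p.1 else none) with _ | ⟨s, _⟩ <;>
    rcases he : (pvEnumFrom 0 output_ids).filterMap (fun p => if p.2 = think_end_id then some p.1 else none) with _ | ⟨e, _⟩ <;>
      rw [hs] at h1 <;> rw [he] at h2 <;> rw [hs, he] <;> simp at h1 h2 <;> rw [← h1, ← h2] <;> simp
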